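-- pv_equiv track=rewrite | github.com/Xu-Hongwei/Olinechat_to_word | app.py | replace_spacing_commands
-- ===== SOURCE A (Python) =====
-- def replace_spacing_commands(text: str) -> str:
--     replacements = {
--         r"\qquad": " ",
--         r"\quad": " ",
--         r"\;": " ",
--         r"\,": " ",
--         r"\!": "",
--     }
--     value = text
--     for source, target in replacements.items():
--         value = value.replace(source, target)
--     return value
-- ===== SOURCE B (Python) =====
-- _TOKENS = [("\\qquad", " "), ("\\quad", " "), ("\\;", " "), ("\\,", " "), ("\\!", "")]
--
--
-- def replace_spacing_commands(text: str) -> str: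
--     out = []
--     i = 0
--     n = len(text)
--     while i < n:
--         for tok, rep in _TOKENS:
--             if text.startswith(tok, i):
--                 out.append(rep)
--                 i += len(tok)
--                 break
--         else:
--             out.append(text[i])
--             i += 1
--     return "".join(out)
-- ===== Notes on version B (the rewrite author's own statement) =====
-- stated objective: alternative
-- what changed: Replaces five sequential full-string .replace passes with a single left-to-right scan that tries the five tokens (longest first) at each position and emits the replacement or the character; it trades the C-speed of str.replace for a single pass in pure Python.
import Mathlib
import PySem

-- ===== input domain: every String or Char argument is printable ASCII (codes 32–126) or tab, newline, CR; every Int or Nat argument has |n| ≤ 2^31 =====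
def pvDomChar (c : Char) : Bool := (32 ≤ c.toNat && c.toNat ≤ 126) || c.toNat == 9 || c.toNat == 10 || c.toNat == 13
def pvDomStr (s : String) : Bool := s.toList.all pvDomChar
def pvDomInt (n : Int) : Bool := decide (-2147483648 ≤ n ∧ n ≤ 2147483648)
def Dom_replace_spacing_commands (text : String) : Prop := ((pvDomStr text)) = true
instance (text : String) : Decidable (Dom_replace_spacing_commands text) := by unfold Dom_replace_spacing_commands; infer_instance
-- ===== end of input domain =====

-- B replaces A's five sequential full-string .replace passes with ONE left-to-right scan
-- that tries the five tokens (longest first) at each position; same return value.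

-- ===== PORT A =====
def replace_spacing_commands (text : String) : String :=
  let replacements : List (String × String) :=
    [("\\qquad", " "), ("\\quad", " "), ("\\;", " "), ("\\,", " "), ("\\!", "")]
  replacements.foldl (fun value st => PySem.Str.replace value st.1 st.2) text

-- ===== PORT B =====
-- the while-loop of Source B: at each position try the five tokens (startswith), else copy one char
def pvScanB : List Char → List Char
  | [] => []
  | c :: t =>
    if ['\\', 'q', 'q', 'u', 'a', 'd'].isPrefixOf (c :: t) then ' ' :: pvScanB ((c :: t).drop 6)
    else if ['\\', 'q', 'u', 'a', 'd'].isPrefixOf (c :: t) then ' ' :: pvScanB ((c :: t).drop 5)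
    else if ['\\', ';'].isPrefixOf (c :: t) then ' ' :: pvScanB ((c :: t).drop 2)
    else if ['\\', ','].isPrefixOf (c :: t) then ' ' :: pvScanB ((c :: t).drop 2)
    else if ['\\', '!'].isPrefixOf (c :: t) then pvScanB ((c :: t).drop 2)
    else c :: pvScanB t
  termination_by l => l.length
  decreasing_by all_goals simp

def replace_spacing_commands_alt (text : String) : String :=
  String.ofList (pvScanB text.toList)

-- ===== PRECONDITION & SPEC =====
def Spec_replace_spacing_commands (text : String) (out : String) : Prop := out = replace_spacing_commands_alt text
instance (text : String) (out : String) : Decidable (Spec_replace_spacing_commands text out) := by unfold Spec_replace_spacing_commands; infer_instance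

-- ===== CLAIM (what is proved, stated in full; the proofs are below) =====
def Claim_equal_replace_spacing_commands : Prop := ∀ (text : String), Dom_replace_spacing_commands text → Spec_replace_spacing_commands text (replace_spacing_commands text)

-- ===== LEMMAS AND PROOFS =====

-- one .replace pass with a nonempty pattern (o :: os), as a clean recursion
def pvRep (o : Char) (os nw : List Char) : List Char → List Char
  | [] => []
  | c :: t =>
    if (o :: os).isPrefixOf (c :: t) then nw ++ pvRep o os nw (t.drop os.length)
    else c :: pvRep o os nw t
  termination_by l => l.length
  decreasing_by all_goals simp

theorem pvRep_go (o : Char) (os nw : List Char) :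
    ∀ (fuel : Nat) (l acc : List Char), l.length ≤ fuel →
      PySem.Chars.replace.go (o :: os) nw fuel l acc = acc.reverse ++ pvRep o os nw l := by
  intro fuel
  induction fuel with
  | zero =>
    intro l acc h
    have : l = [] := List.eq_nil_of_length_eq_zero (Nat.le_zero.mp h)
    subst this
    simp [PySem.Chars.replace.go, pvRep]
  | succ n ih =>
    intro l acc h
    cases l with
    | nil => simp [PySem.Chars.replace.go, pvRep]
    | cons c t =>
      by_cases hp : (o :: os).isPrefixOf (c :: t)
      · rw [PySem.Chars.replace.go]
        simp only [hp, if_true]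
        rw [ih _ _ (by simp at h ⊢; omega)]
        simp [pvRep, hp]
      · have hh := ih t (c :: acc) (by simp at h ⊢; omega)
        rw [PySem.Chars.replace.go]
        simp only [hp] at hh ⊢
        rw [hh, pvRep]
        simp [hp]

theorem pvReplace_eq (o : Char) (os nw l : List Char) :
    PySem.Chars.replace l (o :: os) nw = pvRep o os nw l := by
  simp [PySem.Chars.replace]
  exact pvRep_go o os nw l.length l [] le_rfl

-- A on char lists: the five passes composed
def pvA5 (l : List Char) : List Char :=
  pvRep '\\' ['!'] []
    (pvRep '\\' [','] [' ']
      (pvRep '\\' [';'] [' ']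
        (pvRep '\\' ['q', 'u', 'a', 'd'] [' ']
          (pvRep '\\' ['q', 'q', 'u', 'a', 'd'] [' '] l))))

-- a pass whose pattern starts with '\' leaves a head character ≠ '\' in place
theorem pvRep_head_ne (os nw : List Char) (c : Char) (t : List Char) (h : c ≠ '\\') :
    pvRep '\\' os nw (c :: t) = c :: pvRep '\\' os nw t := by
  rw [pvRep]
  have : ('\\' :: os).isPrefixOf (c :: t) = false := by
    simp [List.isPrefixOf]
    intro hc; exact absurd hc.symm h
  simp [this]

-- a '\'-pattern pass with replacement " " cannot create a new occurrence of a
-- backslash-free, space-free word v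
theorem pvRep_no_create (os : List Char) :
    ∀ (n : Nat) (t v : List Char), t.length ≤ n → v ≠ [] → '\\' ∉ v → ' ' ∉ v →
      ¬ v <+: t → ¬ v <+: pvRep '\\' os [' '] t := by
  intro n
  induction n with
  | zero =>
    intro t v ht hv _ _ hnp
    have : t = [] := List.eq_nil_of_length_eq_zero (Nat.le_zero.mp ht)
    subst this
    simpa [pvRep] using hnp
  | succ n ih =>
    intro t v ht hv hbs hsp hnp
    cases t with
    | nil => simpa [pvRep] using hnp
    | cons c t' =>
      by_cases hp : ('\\' :: os).isPrefixOf (c :: t')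
      · rw [pvRep]; simp only [hp, if_true]
        intro hcon
        cases v with
        | nil => exact hv rfl
        | cons a v' =>
          have : a = ' ' := by
            rcases hcon with ⟨r, hr⟩
            simpa using congrArg (fun l => l.head?) hr
          exact hsp (this ▸ List.mem_cons_self)
      · rw [pvRep]; simp only [hp]
        intro hcon
        cases v with
        | nil => exact hv rfl
        | cons a v' =>
          have ha : a = c := by
            rcases hcon with ⟨r, hr⟩
            simpa using congrArg (fun l => l.head?) hr
          subst ha
          rcases List.cons_prefix_cons.mp hcon with ⟨-, hv'⟩
          by_cases hv'nil : v' = []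
          · subst hv'nil
            exact hnp ⟨t', rfl⟩
          · have hnp' : ¬ v' <+: t' := fun hc =>
              hnp (List.cons_prefix_cons.mpr ⟨rfl, hc⟩)
            exact ih t' v' (by simp at ht; omega) hv'nil
              (fun h => hbs (List.mem_cons_of_mem _ h))
              (fun h => hsp (List.mem_cons_of_mem _ h)) hnp' hv'


theorem pvPrefixFalse {l₁ l₂ : List Char} (h : ¬ l₁ <+: l₂) : l₁.isPrefixOf l₂ = false :=
  Bool.eq_false_iff.mpr (fun ht => h (List.isPrefixOf_iff_prefix.mp ht))

theorem pvRep_cons_false (o : Char) (os nw : List Char) (c : Char) (t : List Char)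
    (h : (o :: os).isPrefixOf (c :: t) = false) :
    pvRep o os nw (c :: t) = c :: pvRep o os nw t := by
  rw [pvRep]; simp [h]

theorem pvA5_eq_scanB : ∀ (n : Nat) (l : List Char), l.length ≤ n → pvA5 l = pvScanB l := by
  intro n
  induction n with
  | zero =>
    intro l h
    have : l = [] := List.eq_nil_of_length_eq_zero (Nat.le_zero.mp h)
    subst this
    simp [pvA5, pvRep, pvScanB]
  | succ n ih =>
    intro l h
    cases l with
    | nil => simp [pvA5, pvRep, pvScanB]
    | cons c t =>
      by_cases hc : c = '\\'
      · subst hc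
        have hlen : t.length ≤ n := by simp at h; omega
        by_cases h1 : ['q', 'q', 'u', 'a', 'd'] <+: t
        · rcases h1 with ⟨r, rfl⟩
          have ihr := ih r (by simp at hlen; omega)
          simp only [List.cons_append, List.nil_append] at *
          rw [pvScanB]
          simp only [pvA5] at ihr ⊢
          simp [pvRep, List.isPrefixOf] at ihr ⊢
          exact ihr
        · by_cases h2 : ['q', 'u', 'a', 'd'] <+: t
          · rcases h2 with ⟨r, rfl⟩
            have ihr := ih r (by simp at hlen; omega)
            simp only [List.cons_append, List.nil_append] at *
            rw [pvScanB]
            simp only [pvA5] at ihr ⊢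
            simp [pvRep, List.isPrefixOf] at ihr ⊢
            exact ihr
          · by_cases h3 : [';'] <+: t
            · rcases h3 with ⟨r, rfl⟩
              have ihr := ih r (by simp at hlen; omega)
              simp only [List.cons_append, List.nil_append] at *
              rw [pvScanB]
              simp only [pvA5] at ihr ⊢
              simp [pvRep, List.isPrefixOf] at ihr ⊢
              exact ihr
            · by_cases h4 : [','] <+: t
              · rcases h4 with ⟨r, rfl⟩
                have ihr := ih r (by simp at hlen; omega)
                simp only [List.cons_append, List.nil_append] at *
                rw [pvScanB]
                simp only [pvA5] at ihr ⊢
                simp [pvRep, List.isPrefixOf] at ihr ⊢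
                exact ihr
              · by_cases h5 : ['!'] <+: t
                · rcases h5 with ⟨r, rfl⟩
                  have ihr := ih r (by simp at hlen; omega)
                  simp only [List.cons_append, List.nil_append] at *
                  rw [pvScanB]
                  simp only [pvA5] at ihr ⊢
                  simp [pvRep, List.isPrefixOf] at ihr ⊢
                  exact ihr
                · -- no token matches at this backslash
                  have b1 := pvPrefixFalse h1
                  have b2 := pvPrefixFalse h2
                  have b3 := pvPrefixFalse h3
                  have b4 := pvPrefixFalse h4
                  have b5 := pvPrefixFalse h5
                  have nc := fun (os v : List Char) (hv : v ≠ []) (hb : '\\' ∉ v) (hs : ' ' ∉ v)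
                    (t' : List Char) (hnp : ¬ v <+: t') =>
                    pvRep_no_create os t'.length t' v le_rfl hv hb hs hnp
                  have n2a := nc ['q', 'q', 'u', 'a', 'd'] ['q', 'u', 'a', 'd'] (by decide) (by decide) (by decide) t h2
                  have n3a := nc ['q', 'u', 'a', 'd'] [';'] (by decide) (by decide) (by decide) _
                    (nc ['q', 'q', 'u', 'a', 'd'] [';'] (by decide) (by decide) (by decide) t h3)
                  have n4a := nc [';'] [','] (by decide) (by decide) (by decide) _
                    (nc ['q', 'u', 'a', 'd'] [','] (by decide) (by decide) (by decide) _
                      (nc ['q', 'q', 'u', 'a', 'd'] [','] (by decide) (by decide) (by decide) t h4))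
                  have n5a := nc [','] ['!'] (by decide) (by decide) (by decide) _
                    (nc [';'] ['!'] (by decide) (by decide) (by decide) _
                      (nc ['q', 'u', 'a', 'd'] ['!'] (by decide) (by decide) (by decide) _
                        (nc ['q', 'q', 'u', 'a', 'd'] ['!'] (by decide) (by decide) (by decide) t h5)))
                  rw [pvScanB]
                  simp only [List.isPrefixOf, beq_self_eq_true, Bool.true_and,
                    b1, b2, b3, b4, b5, Bool.false_eq_true, if_false]
                  rw [pvA5,
                    pvRep_cons_false _ _ _ _ _ (by simp [List.isPrefixOf, b1]),
                    pvRep_cons_false _ _ _ _ _ (by simp [List.isPrefixOf, pvPrefixFalse n2a]),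
                    pvRep_cons_false _ _ _ _ _ (by simp [List.isPrefixOf, pvPrefixFalse n3a]),
                    pvRep_cons_false _ _ _ _ _ (by simp [List.isPrefixOf, pvPrefixFalse n4a]),
                    pvRep_cons_false _ _ _ _ _ (by simp [List.isPrefixOf, pvPrefixFalse n5a]),
                    ← pvA5, ih t hlen]
      · -- head is not a backslash: every pass and the scan copy it
        have hne : ∀ os : List Char, (('\\' :: os).isPrefixOf (c :: t)) = false := by
          intro os; simp [List.isPrefixOf]; intro h'; exact absurd h'.symm hc
        rw [pvScanB]
        simp only [hne, Bool.false_eq_true, if_false]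
        rw [pvA5, pvRep_head_ne _ _ _ _ hc, pvRep_head_ne _ _ _ _ hc,
          pvRep_head_ne _ _ _ _ hc, pvRep_head_ne _ _ _ _ hc, pvRep_head_ne _ _ _ _ hc]
        rw [← pvA5, ih t (by simp at h; omega)]

-- ===== VERDICT (by name: the statement is the Claim_ definition above) =====
theorem replace_spacing_commands_spec : Claim_equal_replace_spacing_commands := by
  intro text _
  unfold Spec_replace_spacing_commands replace_spacing_commands replace_spacing_commands_alt
  apply String.toList_inj.mp
  simp only [List.foldl, String.toList_ofList, PySem.Str.toList_replace]
  rw [show ("\\qquad" : String).toList = '\\' :: ['q', 'q', 'u', 'a', 'd'] from rfl,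
    show ("\\quad" : String).toList = '\\' :: ['q', 'u', 'a', 'd'] from rfl,
    show ("\\;" : String).toList = '\\' :: [';'] from rfl,
    show ("\\," : String).toList = '\\' :: [','] from rfl,
    show ("\\!" : String).toList = '\\' :: ['!'] from rfl,
    show (" " : String).toList = [' '] from rfl,
    show ("" : String).toList = ([] : List Char) from rfl,
    pvReplace_eq, pvReplace_eq, pvReplace_eq, pvReplace_eq, pvReplace_eq,
    ← pvA5]
  exact pvA5_eq_scanB text.toList.length text.toList le_rfl
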